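-- pv_equiv track=rewrite | github.com/EnTangledUpInBlue/qShop | toric_code_coordinates.py | toric_code_coords
-- ===== SOURCE A (Python) =====
-- from typing import List,Set,Dict,Tuple
--
-- def toric_code_coords(Lx:int,Ly:int) -> List[Set[Tuple[int,int]]]:
--
--     qubit_coords = set()
--     xcheck_coords = set()
--     zcheck_coords = set()
--
--     for x in range(2*Lx):
--         for y in range(2*Ly):
--             if x%2:
--                 if y%2:
--                     zcheck_coords.add((x,y))
--                 else:
--                     qubit_coords.add((x,y))
--             else:
--                 if y%2:
--                     qubit_coords.add((x,y))
--                 else: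
--                     xcheck_coords.add((x,y))
--     return [qubit_coords,xcheck_coords,zcheck_coords]
-- ===== SOURCE B (Python) =====
-- def toric_code_coords(Lx, Ly):
--     # Build each sublattice directly from its arithmetic description over an
--     # Lx-by-Ly index space, instead of scanning all 2Lx*2Ly cells and branching
--     # on parities.
--     xcheck_coords = {(2 * i, 2 * j) for i in range(Lx) for j in range(Ly)}
--     zcheck_coords = {(2 * i + 1, 2 * j + 1) for i in range(Lx) for j in range(Ly)}
--     qubit_coords = set()
--     for i in range(Lx):
--         qubit_coords.update((2 * i, 2 * j + 1) for j in range(Ly))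
--         qubit_coords.update((2 * i + 1, 2 * j) for j in range(Ly))
--     return [qubit_coords, xcheck_coords, zcheck_coords]
-- ===== Notes on version B (the rewrite author's own statement) =====
-- stated objective: alternative
-- what changed: Each of the three sets is built directly from its arithmetic description (x-checks at (2i,2j), z-checks at (2i+1,2j+1), qubits on the two mixed-parity sublattices) over an Lx-by-Ly index space, replacing the single 2Lx-by-2Ly scan with parity branching.
import Mathlib
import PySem

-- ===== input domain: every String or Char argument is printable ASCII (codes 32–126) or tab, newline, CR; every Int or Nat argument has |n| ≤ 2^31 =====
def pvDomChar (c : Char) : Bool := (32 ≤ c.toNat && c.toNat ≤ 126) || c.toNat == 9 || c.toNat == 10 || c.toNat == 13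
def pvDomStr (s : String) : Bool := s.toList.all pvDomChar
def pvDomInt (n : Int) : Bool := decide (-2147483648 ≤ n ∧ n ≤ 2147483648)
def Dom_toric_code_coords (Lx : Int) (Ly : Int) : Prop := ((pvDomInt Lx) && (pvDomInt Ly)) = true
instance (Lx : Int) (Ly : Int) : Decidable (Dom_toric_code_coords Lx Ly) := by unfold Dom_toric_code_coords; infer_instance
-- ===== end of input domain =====

-- B builds each of the three coordinate sets directly from its arithmetic description over an
-- Lx-by-Ly index space instead of A's single 2Lx-by-2Ly scan with parity branching (alternative
-- decomposition, same asymptotic cost).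

-- ===== PORT A =====
def toric_code_coords (Lx : Int) (Ly : Int) : List (List (Int × Int)) :=
  let init : PySem.Set (Int × Int) × PySem.Set (Int × Int) × PySem.Set (Int × Int) :=
    (PySem.Set.empty, PySem.Set.empty, PySem.Set.empty)
  let st := (PySem.List.pyRange 0 (2*Lx) 1).foldl (fun st x =>
      (PySem.List.pyRange 0 (2*Ly) 1).foldl (fun st y =>
        if PySem.Int.mod x 2 ≠ 0 then
          if PySem.Int.mod y 2 ≠ 0 then (st.1, st.2.1, PySem.Set.add st.2.2 (x, y))
          else (PySem.Set.add st.1 (x, y), st.2.1, st.2.2)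
        else
          if PySem.Int.mod y 2 ≠ 0 then (PySem.Set.add st.1 (x, y), st.2.1, st.2.2)
          else (st.1, PySem.Set.add st.2.1 (x, y), st.2.2)) st) init
  [st.1, st.2.1, st.2.2]

-- ===== PORT B =====
def toric_code_coords_alt (Lx : Int) (Ly : Int) : List (List (Int × Int)) :=
  let xcheck : PySem.Set (Int × Int) := PySem.Set.ofList
    ((PySem.List.pyRange 0 Lx 1).flatMap (fun i =>
      (PySem.List.pyRange 0 Ly 1).map (fun j => (2*i, 2*j))))
  let zcheck : PySem.Set (Int × Int) := PySem.Set.ofList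
    ((PySem.List.pyRange 0 Lx 1).flatMap (fun i =>
      (PySem.List.pyRange 0 Ly 1).map (fun j => (2*i+1, 2*j+1))))
  let qubit : PySem.Set (Int × Int) := (PySem.List.pyRange 0 Lx 1).foldl (fun q i =>
      PySem.Set.update
        (PySem.Set.update q ((PySem.List.pyRange 0 Ly 1).map (fun j => (2*i, 2*j+1))))
        ((PySem.List.pyRange 0 Ly 1).map (fun j => (2*i+1, 2*j))))
    PySem.Set.empty
  [qubit, xcheck, zcheck]

-- ===== PRECONDITION & SPEC =====
def Spec_toric_code_coords (Lx : Int) (Ly : Int) (out : List (List (Int × Int))) : Prop := out = toric_code_coords_alt Lx Ly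
instance (Lx : Int) (Ly : Int) (out : List (List (Int × Int))) : Decidable (Spec_toric_code_coords Lx Ly out) := by unfold Spec_toric_code_coords; infer_instance

-- ===== CLAIM (what is proved, stated in full; the proofs are below) =====
def Claim_equal_toric_code_coords : Prop := ∀ (Lx : Int) (Ly : Int), Dom_toric_code_coords Lx Ly → Spec_toric_code_coords Lx Ly (toric_code_coords Lx Ly)

-- ===== LEMMAS AND PROOFS =====

-- adding a whole "row" of coordinates f j, j in range(Ly), to a set
def pvAddRow (Ly : Int) (f : Int → Int × Int) (s : PySem.Set (Int × Int)) : PySem.Set (Int × Int) :=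
  (PySem.List.pyRange 0 Ly 1).foldl (fun s j => PySem.Set.add s (f j)) s

lemma pvAddRow_le (Ly : Int) (h : Ly ≤ 0) (f : Int → Int × Int) (s : PySem.Set (Int × Int)) :
    pvAddRow Ly f s = s := by
  unfold pvAddRow
  rw [PySem.List.pyRange_one_eq_nil (by omega)]
  rfl

lemma pvAddRow_succ (n : Nat) (f : Int → Int × Int) (s : PySem.Set (Int × Int)) :
    pvAddRow ((n:Int)+1) f s = PySem.Set.add (pvAddRow (n:Int) f s) (f (n:Int)) := by
  unfold pvAddRow
  rw [PySem.List.pyRange_one_succ_right (by omega)]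
  simp

-- A's inner loop at an even x = 2*i
lemma pvInnerEvenNat (n : Nat) (i : Int) (q xc zc : PySem.Set (Int × Int)) :
    (PySem.List.pyRange 0 (2*(n:Int)) 1).foldl (fun st y =>
        if PySem.Int.mod (2*i) 2 ≠ 0 then
          if PySem.Int.mod y 2 ≠ 0 then (st.1, st.2.1, PySem.Set.add st.2.2 (2*i, y))
          else (PySem.Set.add st.1 (2*i, y), st.2.1, st.2.2)
        else
          if PySem.Int.mod y 2 ≠ 0 then (PySem.Set.add st.1 (2*i, y), st.2.1, st.2.2)
          else (st.1, PySem.Set.add st.2.1 (2*i, y), st.2.2)) (q, xc, zc)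
    = (pvAddRow (n:Int) (fun j => (2*i, 2*j+1)) q, pvAddRow (n:Int) (fun j => (2*i, 2*j)) xc, zc) := by
  induction n with
  | zero => simp [pvAddRow]
  | succ n ih =>
      have h1 : (2*((n+1:Nat)):Int) = 2*(n:Int)+1+1 := by push_cast; ring
      have h2 : ((n+1:Nat):Int) = (n:Int)+1 := by push_cast; ring
      rw [h1, PySem.List.pyRange_one_succ_right (by omega),
          PySem.List.pyRange_one_succ_right (by omega)]
      simp only [List.foldl_append, List.foldl_cons, List.foldl_nil, ih]
      rw [h2, pvAddRow_succ, pvAddRow_succ]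
      simp

-- A's inner loop at an odd x = 2*i+1
lemma pvInnerOddNat (n : Nat) (i : Int) (q xc zc : PySem.Set (Int × Int)) :
    (PySem.List.pyRange 0 (2*(n:Int)) 1).foldl (fun st y =>
        if PySem.Int.mod (2*i+1) 2 ≠ 0 then
          if PySem.Int.mod y 2 ≠ 0 then (st.1, st.2.1, PySem.Set.add st.2.2 (2*i+1, y))
          else (PySem.Set.add st.1 (2*i+1, y), st.2.1, st.2.2)
        else
          if PySem.Int.mod y 2 ≠ 0 then (PySem.Set.add st.1 (2*i+1, y), st.2.1, st.2.2)
          else (st.1, PySem.Set.add st.2.1 (2*i+1, y), st.2.2)) (q, xc, zc)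
    = (pvAddRow (n:Int) (fun j => (2*i+1, 2*j)) q, xc, pvAddRow (n:Int) (fun j => (2*i+1, 2*j+1)) zc) := by
  induction n with
  | zero => simp [pvAddRow]
  | succ n ih =>
      have h1 : (2*((n+1:Nat)):Int) = 2*(n:Int)+1+1 := by push_cast; ring
      have h2 : ((n+1:Nat):Int) = (n:Int)+1 := by push_cast; ring
      rw [h1, PySem.List.pyRange_one_succ_right (by omega),
          PySem.List.pyRange_one_succ_right (by omega)]
      simp only [List.foldl_append, List.foldl_cons, List.foldl_nil, ih]
      rw [h2, pvAddRow_succ, pvAddRow_succ]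
      simp

lemma pvInnerEven (Ly : Int) (i : Int) (q xc zc : PySem.Set (Int × Int)) :
    (PySem.List.pyRange 0 (2*Ly) 1).foldl (fun st y =>
        if PySem.Int.mod (2*i) 2 ≠ 0 then
          if PySem.Int.mod y 2 ≠ 0 then (st.1, st.2.1, PySem.Set.add st.2.2 (2*i, y))
          else (PySem.Set.add st.1 (2*i, y), st.2.1, st.2.2)
        else
          if PySem.Int.mod y 2 ≠ 0 then (PySem.Set.add st.1 (2*i, y), st.2.1, st.2.2)
          else (st.1, PySem.Set.add st.2.1 (2*i, y), st.2.2)) (q, xc, zc)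
    = (pvAddRow Ly (fun j => (2*i, 2*j+1)) q, pvAddRow Ly (fun j => (2*i, 2*j)) xc, zc) := by
  rcases (by omega : Ly ≤ 0 ∨ 0 < Ly) with h | h
  · rw [PySem.List.pyRange_one_eq_nil (show 2*Ly ≤ 0 by omega), pvAddRow_le Ly h, pvAddRow_le Ly h]
    rfl
  · have hL : Ly = (Ly.toNat : Int) := (Int.toNat_of_nonneg h.le).symm
    rw [hL]
    exact pvInnerEvenNat Ly.toNat i q xc zc

lemma pvInnerOdd (Ly : Int) (i : Int) (q xc zc : PySem.Set (Int × Int)) :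
    (PySem.List.pyRange 0 (2*Ly) 1).foldl (fun st y =>
        if PySem.Int.mod (2*i+1) 2 ≠ 0 then
          if PySem.Int.mod y 2 ≠ 0 then (st.1, st.2.1, PySem.Set.add st.2.2 (2*i+1, y))
          else (PySem.Set.add st.1 (2*i+1, y), st.2.1, st.2.2)
        else
          if PySem.Int.mod y 2 ≠ 0 then (PySem.Set.add st.1 (2*i+1, y), st.2.1, st.2.2)
          else (st.1, PySem.Set.add st.2.1 (2*i+1, y), st.2.2)) (q, xc, zc)
    = (pvAddRow Ly (fun j => (2*i+1, 2*j)) q, xc, pvAddRow Ly (fun j => (2*i+1, 2*j+1)) zc) := by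
  rcases (by omega : Ly ≤ 0 ∨ 0 < Ly) with h | h
  · rw [PySem.List.pyRange_one_eq_nil (show 2*Ly ≤ 0 by omega), pvAddRow_le Ly h, pvAddRow_le Ly h]
    rfl
  · have hL : Ly = (Ly.toNat : Int) := (Int.toNat_of_nonneg h.le).symm
    rw [hL]
    exact pvInnerOddNat Ly.toNat i q xc zc

-- A's whole double loop, in closed row form
lemma pvOuter (m : Nat) (Ly : Int) (q xc zc : PySem.Set (Int × Int)) :
    (PySem.List.pyRange 0 (2*(m:Int)) 1).foldl (fun st x =>
      (PySem.List.pyRange 0 (2*Ly) 1).foldl (fun st y =>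
        if PySem.Int.mod x 2 ≠ 0 then
          if PySem.Int.mod y 2 ≠ 0 then (st.1, st.2.1, PySem.Set.add st.2.2 (x, y))
          else (PySem.Set.add st.1 (x, y), st.2.1, st.2.2)
        else
          if PySem.Int.mod y 2 ≠ 0 then (PySem.Set.add st.1 (x, y), st.2.1, st.2.2)
          else (st.1, PySem.Set.add st.2.1 (x, y), st.2.2)) st) (q, xc, zc)
    = ((PySem.List.pyRange 0 (m:Int) 1).foldl
         (fun s i => pvAddRow Ly (fun j => (2*i+1, 2*j)) (pvAddRow Ly (fun j => (2*i, 2*j+1)) s)) q,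
       (PySem.List.pyRange 0 (m:Int) 1).foldl (fun s i => pvAddRow Ly (fun j => (2*i, 2*j)) s) xc,
       (PySem.List.pyRange 0 (m:Int) 1).foldl (fun s i => pvAddRow Ly (fun j => (2*i+1, 2*j+1)) s) zc) := by
  induction m generalizing q xc zc with
  | zero => simp
  | succ m ih =>
      have h1 : (2*((m+1:Nat)):Int) = 2*(m:Int)+1+1 := by push_cast; ring
      have h2 : ((m+1:Nat):Int) = (m:Int)+1 := by push_cast; ring
      rw [h1, PySem.List.pyRange_one_succ_right (by omega),
          PySem.List.pyRange_one_succ_right (by omega),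
          h2, PySem.List.pyRange_one_succ_right (by omega)]
      simp only [List.foldl_append, List.foldl_cons, List.foldl_nil, ih]
      rw [pvInnerEven Ly (m:Int), pvInnerOdd Ly (m:Int)]

-- B's three sets, in the same row form
lemma pvFoldMap (Ly : Int) (g : Int → Int × Int) (s : PySem.Set (Int × Int)) :
    List.foldl PySem.Set.add s ((PySem.List.pyRange 0 Ly 1).map g) = pvAddRow Ly g s := by
  rw [List.foldl_map]; rfl

lemma pvQubitStep (Ly : Int) (q : PySem.Set (Int × Int)) (i : Int) :
    PySem.Set.update
      (PySem.Set.update q ((PySem.List.pyRange 0 Ly 1).map (fun j => (2*i, 2*j+1))))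
      ((PySem.List.pyRange 0 Ly 1).map (fun j => (2*i+1, 2*j)))
    = pvAddRow Ly (fun j => (2*i+1, 2*j)) (pvAddRow Ly (fun j => (2*i, 2*j+1)) q) := by
  rw [PySem.Set.update_map_eq_foldl_add, PySem.Set.update_map_eq_foldl_add]
  rfl

lemma pvAltEval (Lx Ly : Int) :
    toric_code_coords_alt Lx Ly
    = [(PySem.List.pyRange 0 Lx 1).foldl
         (fun s i => pvAddRow Ly (fun j => (2*i+1, 2*j)) (pvAddRow Ly (fun j => (2*i, 2*j+1)) s)) [],
       (PySem.List.pyRange 0 Lx 1).foldl (fun s i => pvAddRow Ly (fun j => (2*i, 2*j)) s) [],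
       (PySem.List.pyRange 0 Lx 1).foldl (fun s i => pvAddRow Ly (fun j => (2*i+1, 2*j+1)) s) []] := by
  unfold toric_code_coords_alt
  rw [PySem.Set.ofList_eq_foldl, PySem.Set.ofList_eq_foldl, List.foldl_flatMap, List.foldl_flatMap]
  simp only [pvFoldMap, pvQubitStep]
  rfl

lemma pvAEval (Lx Ly : Int) :
    toric_code_coords Lx Ly =
    [((PySem.List.pyRange 0 (2*Lx) 1).foldl (fun st x =>
      (PySem.List.pyRange 0 (2*Ly) 1).foldl (fun st y =>
        if PySem.Int.mod x 2 ≠ 0 then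
          if PySem.Int.mod y 2 ≠ 0 then (st.1, st.2.1, PySem.Set.add st.2.2 (x, y))
          else (PySem.Set.add st.1 (x, y), st.2.1, st.2.2)
        else
          if PySem.Int.mod y 2 ≠ 0 then (PySem.Set.add st.1 (x, y), st.2.1, st.2.2)
          else (st.1, PySem.Set.add st.2.1 (x, y), st.2.2)) st)
      (PySem.Set.empty, PySem.Set.empty, PySem.Set.empty)).1,
     ((PySem.List.pyRange 0 (2*Lx) 1).foldl (fun st x =>
      (PySem.List.pyRange 0 (2*Ly) 1).foldl (fun st y =>
        if PySem.Int.mod x 2 ≠ 0 then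
          if PySem.Int.mod y 2 ≠ 0 then (st.1, st.2.1, PySem.Set.add st.2.2 (x, y))
          else (PySem.Set.add st.1 (x, y), st.2.1, st.2.2)
        else
          if PySem.Int.mod y 2 ≠ 0 then (PySem.Set.add st.1 (x, y), st.2.1, st.2.2)
          else (st.1, PySem.Set.add st.2.1 (x, y), st.2.2)) st)
      (PySem.Set.empty, PySem.Set.empty, PySem.Set.empty)).2.1,
     ((PySem.List.pyRange 0 (2*Lx) 1).foldl (fun st x =>
      (PySem.List.pyRange 0 (2*Ly) 1).foldl (fun st y =>
        if PySem.Int.mod x 2 ≠ 0 then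
          if PySem.Int.mod y 2 ≠ 0 then (st.1, st.2.1, PySem.Set.add st.2.2 (x, y))
          else (PySem.Set.add st.1 (x, y), st.2.1, st.2.2)
        else
          if PySem.Int.mod y 2 ≠ 0 then (PySem.Set.add st.1 (x, y), st.2.1, st.2.2)
          else (st.1, PySem.Set.add st.2.1 (x, y), st.2.2)) st)
      (PySem.Set.empty, PySem.Set.empty, PySem.Set.empty)).2.2] := rfl

-- ===== VERDICT (by name: the statement is the Claim_ definition above) =====
theorem toric_code_coords_spec : Claim_equal_toric_code_coords := by
  intro Lx Ly _
  unfold Spec_toric_code_coords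
  rw [pvAEval, pvAltEval]
  rcases (by omega : Lx ≤ 0 ∨ 0 < Lx) with h | h
  · rw [PySem.List.pyRange_one_eq_nil (show 2*Lx ≤ 0 by omega),
        PySem.List.pyRange_one_eq_nil (show Lx ≤ 0 by omega)]
    rfl
  · have hL : Lx = (Lx.toNat : Int) := (Int.toNat_of_nonneg h.le).symm
    rw [hL, pvOuter Lx.toNat Ly]
    rfl
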